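-- pv_equiv track=rewrite | github.com/zmielko/CtrlF-TF | src/ctrlf_tf/site_call_utils.py | expand_kmer
-- ===== SOURCE A (Python) =====
-- from typing import Iterable, List
--
-- def expand_kmer(kmer: str) -> List[str]:
--     """Given a k-mer with wildcards as '.' returns all non-gapped sequences."""
--     results = []
--
--     def recurse_expand(fullword, result, idx):
--         if idx == len(fullword):
--             results.append(result)
--             return
--         if fullword[idx] == '.':
--             for i in ["A", "C", "G", "T"]:
--                 recurse_expand(fullword, result + i, idx + 1)
--         else:
--             recurse_expand(fullword, result + fullword[idx], idx + 1)
--     recurse_expand(kmer, '', 0)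
--     return results
-- ===== SOURCE B (Python) =====
-- from itertools import product
-- from typing import List
--
-- def expand_kmer(kmer: str) -> List[str]:
--     """Given a k-mer with wildcards as '.' returns all non-gapped sequences."""
--     choices = [("A", "C", "G", "T") if c == "." else (c,) for c in kmer]
--     return ["".join(tup) for tup in product(*choices)]
-- ===== Notes on version B (the rewrite author's own statement) =====
-- stated objective: idiomatic
-- what changed: Replaced the hand-written nested recursion with mutable accumulation by mapping each position to its choice list and enumerating itertools.product, joining each tuple.
import Mathlib
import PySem

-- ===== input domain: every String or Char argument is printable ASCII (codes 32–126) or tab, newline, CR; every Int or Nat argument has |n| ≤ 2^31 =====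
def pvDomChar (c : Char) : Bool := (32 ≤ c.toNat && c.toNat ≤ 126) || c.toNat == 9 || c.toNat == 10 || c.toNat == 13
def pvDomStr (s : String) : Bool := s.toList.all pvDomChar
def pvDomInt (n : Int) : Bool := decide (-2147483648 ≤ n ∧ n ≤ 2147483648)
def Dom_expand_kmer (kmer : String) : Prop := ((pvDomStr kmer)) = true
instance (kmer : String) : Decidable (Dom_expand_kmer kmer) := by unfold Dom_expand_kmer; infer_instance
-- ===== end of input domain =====

-- B replaces A's hand-written recursion by a per-position choice list combined with a
-- cartesian product (itertools.product) — objective: more idiomatic; same output, same order.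

-- ===== PORT A =====
-- A's inner recursion: walks the word position by position, extending the accumulated
-- result; at the end the finished result is emitted (string accumulation done on List Char,
-- converted to String exactly where Python appends to `results`).
def expandKmerRec (rest : List Char) (result : List Char) : List String :=
  match rest with
  | [] => [String.ofList result]
  | c :: rest' =>
      if c = '.' then
        ['A', 'C', 'G', 'T'].flatMap (fun i => expandKmerRec rest' (result ++ [i]))
      else
        expandKmerRec rest' (result ++ [c])

def expand_kmer (kmer : String) : List String :=
  expandKmerRec kmer.toList []

-- ===== PORT B =====
-- cartesian product of the choice lists, leftmost position varying slowest (itertools.product)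
def prodChoices (choices : List (List Char)) : List (List Char) :=
  match choices with
  | [] => [[]]
  | cs :: rest => cs.flatMap (fun c => (prodChoices rest).map (fun t => c :: t))

def expand_kmer_alt (kmer : String) : List String :=
  let choices := kmer.toList.map (fun c => if c = '.' then ['A', 'C', 'G', 'T'] else [c])
  (prodChoices choices).map String.ofList

-- ===== PRECONDITION & SPEC =====
def Spec_expand_kmer (kmer : String) (out : List String) : Prop := out = expand_kmer_alt kmer
instance (kmer : String) (out : List String) : Decidable (Spec_expand_kmer kmer out) := by unfold Spec_expand_kmer; infer_instance

-- ===== CLAIM (what is proved, stated in full; the proofs are below) =====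
def Claim_equal_expand_kmer : Prop := ∀ (kmer : String), Dom_expand_kmer kmer → Spec_expand_kmer kmer (expand_kmer kmer)

-- ===== LEMMAS AND PROOFS =====
theorem expandKmerRec_eq (rest : List Char) (result : List Char) :
    expandKmerRec rest result =
      (prodChoices (rest.map (fun c => if c = '.' then ['A', 'C', 'G', 'T'] else [c]))).map
        (fun t => String.ofList (result ++ t)) := by
  induction rest generalizing result with
  | nil => simp [expandKmerRec, prodChoices]
  | cons c rest' ih =>
      by_cases h : c = '.'
      · simp [expandKmerRec, prodChoices, h, ih, List.map_flatMap, Function.comp_def,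
          List.append_assoc]
      · simp [expandKmerRec, prodChoices, h, ih, List.map_flatMap, Function.comp_def,
          List.append_assoc]

-- ===== VERDICT (by name: the statement is the Claim_ definition above) =====
theorem expand_kmer_spec : Claim_equal_expand_kmer := by
  intro kmer _
  unfold Spec_expand_kmer expand_kmer expand_kmer_alt
  simpa using expandKmerRec_eq kmer.toList []
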